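-- pv_equiv track=rewrite | github.com/AlimMid/PokerEV | Cards_old.py | boardcomb
-- ===== SOURCE A (Python) =====
-- def boardcomb(H):
--     s=len(H)
--     comb=[]
--     for k1 in range(s-4):
--         for k2 in range(k1+1,s-3):
--             for k3 in range(k2+1,s-2):
--                 for k4 in range(k3+1,s-1):
--                     for k5 in range(k4+1,s):
--                         b1=H[k1]
--                         b2=H[k2]
--                         b3=H[k3]
--                         b4=H[k4]
--                         b5=H[k5]
--                         x=[b1,b2,b3,b4,b5]
--                         comb.append(x)
--     return comb
-- ===== SOURCE B (Python) =====
-- def boardcomb(H):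
--     # recursive k-combinations: pick the head (prepend to each (k-1)-combo of the
--     # rest) then all k-combos that skip the head; same index-lexicographic order.
--     def combos(k, xs):
--         if k == 0:
--             return [[]]
--         if not xs:
--             return []
--         head, rest = xs[0], xs[1:]
--         return [[head] + t for t in combos(k - 1, rest)] + combos(k, rest)
--     return combos(5, H)
-- ===== Notes on version B (the rewrite author's own statement) =====
-- stated objective: alternative
-- what changed: Replaced the five hard-coded nested index loops by a recursive combinations helper choose(k, xs) = head-combos ++ tail-combos, generalizing to any k.
import Mathlib
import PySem

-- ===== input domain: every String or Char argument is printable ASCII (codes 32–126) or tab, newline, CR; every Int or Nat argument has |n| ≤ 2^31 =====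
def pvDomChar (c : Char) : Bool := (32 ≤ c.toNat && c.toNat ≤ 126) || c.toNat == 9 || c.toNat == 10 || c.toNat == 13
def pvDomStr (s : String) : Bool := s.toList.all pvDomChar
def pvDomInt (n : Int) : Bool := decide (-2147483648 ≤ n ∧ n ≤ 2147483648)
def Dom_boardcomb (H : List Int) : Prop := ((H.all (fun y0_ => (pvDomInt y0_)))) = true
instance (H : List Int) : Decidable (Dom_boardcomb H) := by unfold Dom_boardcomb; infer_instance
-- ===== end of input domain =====

-- B replaces A's five hard-coded nested index loops by a recursive combinations
-- helper (pick-the-head ++ skip-the-head); same output in the same order.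

-- ===== PORT A =====
def boardcomb (H : List Int) : List (List Int) :=
  let s : Int := H.length
  (PySem.List.pyRange 0 (s - 4) 1).foldl (fun comb k1 =>
    (PySem.List.pyRange (k1 + 1) (s - 3) 1).foldl (fun comb k2 =>
      (PySem.List.pyRange (k2 + 1) (s - 2) 1).foldl (fun comb k3 =>
        (PySem.List.pyRange (k3 + 1) (s - 1) 1).foldl (fun comb k4 =>
          (PySem.List.pyRange (k4 + 1) s 1).foldl (fun comb k5 =>
            comb ++ [[PySem.List.pyGetD H k1 0, PySem.List.pyGetD H k2 0,
                      PySem.List.pyGetD H k3 0, PySem.List.pyGetD H k4 0,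
                      PySem.List.pyGetD H k5 0]]) comb) comb) comb) comb) []

-- ===== PORT B =====
-- B's helper combos(k, xs): if k==0 → [[]]; if xs empty → []; else
-- head-prepended (k-1)-combos of the rest ++ k-combos of the rest.
def combos : Nat → List Int → List (List Int)
  | 0, _ => [[]]
  | _ + 1, [] => []
  | k + 1, x :: rest => ((combos k rest).map (fun t => x :: t)) ++ combos (k + 1) rest

def boardcomb_alt (H : List Int) : List (List Int) := combos 5 H

-- ===== PRECONDITION & SPEC =====
def Spec_boardcomb (H : List Int) (out : List (List Int)) : Prop := out = boardcomb_alt H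
instance (H : List Int) (out : List (List Int)) : Decidable (Spec_boardcomb H out) := by unfold Spec_boardcomb; infer_instance

-- ===== CLAIM (what is proved, stated in full; the proofs are below) =====
def Claim_equal_boardcomb : Prop := ∀ (H : List Int), Dom_boardcomb H → Spec_boardcomb H (boardcomb H)

-- ===== LEMMAS AND PROOFS =====

-- index-based intermediate form of A: level k+1 ranges i over [a, len H - k)
def idxC (H : List Int) : Nat → Int → List (List Int)
  | 0, _ => [[]]
  | k + 1, a => (PySem.List.pyRange a ((H.length : Int) - k) 1).flatMap
      (fun i => (idxC H k (i + 1)).map (fun t => PySem.List.pyGetD H i 0 :: t))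

lemma combos_eq_nil (k : Nat) (xs : List Int) (h : xs.length < k) : combos k xs = [] := by
  induction xs generalizing k with
  | nil => cases k with
    | zero => omega
    | succ k => rfl
  | cons x rest ih =>
    cases k with
    | zero => omega
    | succ k =>
      simp at h
      simp [combos, ih k (by omega), ih (k+1) (by omega)]

lemma idxC_succ (H : List Int) (k : Nat)
    (IHk : ∀ a : Nat, idxC H k (a : Int) = combos k (H.drop a)) :
    ∀ (n a : Nat), H.length - a ≤ n → idxC H (k + 1) (a : Int) = combos (k + 1) (H.drop a) := by
  intro n
  induction n with
  | zero =>
    intro a ha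
    have hdrop : H.drop a = [] := List.drop_eq_nil_iff.mpr (by omega)
    rw [idxC, PySem.List.pyRange_one_eq_nil (by omega), hdrop]
    simp [combos]
  | succ n ihn =>
    intro a ha
    by_cases hlt : a + k < H.length
    · have halen : a < H.length := by omega
      have hdrop : H.drop a = H[a] :: H.drop (a + 1) := List.drop_eq_getElem_cons halen
      rw [idxC, PySem.List.pyRange_one_cons (by omega)]
      rw [List.flatMap_cons]
      have hget : PySem.List.pyGetD H (a : Int) 0 = H[a] := by
        rw [PySem.List.pyGetD_natCast]
        exact List.getD_eq_getElem H 0 halen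
      have h1 : ((a : Int) + 1) = ((a + 1 : Nat) : Int) := by push_cast; ring
      have htail : (PySem.List.pyRange ((a:Int) + 1) ((H.length : Int) - k) 1).flatMap
          (fun i => (idxC H k (i + 1)).map (fun t => PySem.List.pyGetD H i 0 :: t))
          = idxC H (k + 1) ((a:Int) + 1) := by rw [idxC]
      rw [htail, h1, ihn (a+1) (by omega), IHk (a+1), hdrop, hget, combos]
    · have hdrop : (H.drop a).length < k + 1 := by simp; omega
      rw [idxC, PySem.List.pyRange_one_eq_nil (by omega),
        combos_eq_nil (k+1) _ hdrop]
      simp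

lemma idxC_eq_combos (H : List Int) :
    ∀ (k : Nat) (a : Nat), idxC H k (a : Int) = combos k (H.drop a) := by
  intro k
  induction k with
  | zero => intro a; simp [idxC, combos]
  | succ k ih => intro a; exact idxC_succ H k ih H.length a (by omega)

lemma boardcomb_eq_idxC (H : List Int) : boardcomb H = idxC H 5 0 := by
  simp [boardcomb, idxC, List.flatMap_def, List.map_flatten, List.map_map,
    Function.comp_def]

-- ===== VERDICT (by name: the statement is the Claim_ definition above) =====
theorem boardcomb_spec : Claim_equal_boardcomb := by
  intro H _
  show boardcomb H = boardcomb_alt H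
  rw [boardcomb_eq_idxC, boardcomb_alt]
  simpa using idxC_eq_combos H 5 0
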